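-- pv_equiv track=rewrite | github.com/ruxailab/disgitbot | discord_bot/src/utils/role_utils.py | determine_role
-- ===== SOURCE A (Python) =====
-- PR_THRESHOLDS = {
--     "Beginner (1-5 PRs)": 1,
--     "Contributor (6-15 PRs)": 6,
--     "Analyst (16-30 PRs)": 16,
--     "Expert (31-50 PRs)": 31,
--     "Master (51+ PRs)": 51
-- }
--
-- ISSUE_THRESHOLDS = {
--     "Beginner (1-5 Issues)": 1,
--     "Contributor (6-15 Issues)": 6,
--     "Analyst (16-30 Issues)": 16,
--     "Expert (31-50 Issues)": 31,
--     "Master (51+ Issues)": 51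
-- }
--
-- COMMIT_THRESHOLDS = {
--     "Beginner (1-50 Commits)": 1,
--     "Contributor (51-100 Commits)": 51,
--     "Analyst (101-250 Commits)": 101,
--     "Expert (251-500 Commits)": 251,
--     "Master (501+ Commits)": 501
-- }
--
-- def determine_role(pr_count, issues_count, commits_count):
--     """
--     Determine the role for a user based on their contribution counts.
--
--     Args:
--         pr_count: Number of pull requests
--         issues_count: Number of issues
--         commits_count: Number of commits
--
--     Returns:
--         tuple: (pr_role, issue_role, commit_role)
--     """
--     pr_role = None
--     issue_role = None
--     commit_role = None
--
--     # Determine PR role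
--     for role, threshold in reversed(PR_THRESHOLDS.items()):
--         if pr_count >= threshold:
--             pr_role = role
--             break
--
--     # Determine issue role
--     for role, threshold in reversed(ISSUE_THRESHOLDS.items()):
--         if issues_count >= threshold:
--             issue_role = role
--             break
--
--     # Determine commit role
--     for role, threshold in reversed(COMMIT_THRESHOLDS.items()):
--         if commits_count >= threshold:
--             commit_role = role
--             break
--
--     return pr_role, issue_role, commit_role
-- ===== SOURCE B (Python) =====
-- import bisect
--
-- PR_THRESHOLDS = {
--     "Beginner (1-5 PRs)": 1,
--     "Contributor (6-15 PRs)": 6,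
--     "Analyst (16-30 PRs)": 16,
--     "Expert (31-50 PRs)": 31,
--     "Master (51+ PRs)": 51
-- }
--
-- ISSUE_THRESHOLDS = {
--     "Beginner (1-5 Issues)": 1,
--     "Contributor (6-15 Issues)": 6,
--     "Analyst (16-30 Issues)": 16,
--     "Expert (31-50 Issues)": 31,
--     "Master (51+ Issues)": 51
-- }
--
-- COMMIT_THRESHOLDS = {
--     "Beginner (1-50 Commits)": 1,
--     "Contributor (51-100 Commits)": 51,
--     "Analyst (101-250 Commits)": 101,
--     "Expert (251-500 Commits)": 251,
--     "Master (501+ Commits)": 501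
-- }
--
-- def _tier_role(tiers, count):
--     roles = list(tiers.keys())
--     thresholds = list(tiers.values())  # ascending
--     idx = bisect.bisect_right(thresholds, count) - 1
--     return roles[idx] if idx >= 0 else None
--
-- def determine_role(pr_count, issues_count, commits_count):
--     return (_tier_role(PR_THRESHOLDS, pr_count),
--             _tier_role(ISSUE_THRESHOLDS, issues_count),
--             _tier_role(COMMIT_THRESHOLDS, commits_count))
-- ===== Notes on version B (the rewrite author's own statement) =====
-- stated objective: idiomatic
-- what changed: Replaces the reversed linear scan over each threshold dict with one shared helper that binary-searches (bisect_right) an ascending threshold table and indexes a parallel role list.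
import Mathlib
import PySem

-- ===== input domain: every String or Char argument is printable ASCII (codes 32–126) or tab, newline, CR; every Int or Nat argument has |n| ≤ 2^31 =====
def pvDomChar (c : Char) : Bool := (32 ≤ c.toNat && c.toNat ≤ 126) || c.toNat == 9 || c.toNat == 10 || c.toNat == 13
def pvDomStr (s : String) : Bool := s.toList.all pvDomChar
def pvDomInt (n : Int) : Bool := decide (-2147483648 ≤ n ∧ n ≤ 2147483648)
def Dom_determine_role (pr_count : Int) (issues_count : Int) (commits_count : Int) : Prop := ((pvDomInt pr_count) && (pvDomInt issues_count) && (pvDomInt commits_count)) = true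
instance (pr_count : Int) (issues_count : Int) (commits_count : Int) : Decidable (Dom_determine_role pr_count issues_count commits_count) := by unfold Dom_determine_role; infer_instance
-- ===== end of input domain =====

-- B replaces A's reversed linear scan per tier with a bisect_right lookup into the
-- ascending threshold table plus an index into the parallel role-name list (idiomatic).

-- ===== PORT A =====
def prThresholds : List (String × Int) :=
  [("Beginner (1-5 PRs)", 1), ("Contributor (6-15 PRs)", 6), ("Analyst (16-30 PRs)", 16),
   ("Expert (31-50 PRs)", 31), ("Master (51+ PRs)", 51)]
def issueThresholds : List (String × Int) :=
  [("Beginner (1-5 Issues)", 1), ("Contributor (6-15 Issues)", 6), ("Analyst (16-30 Issues)", 16),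
   ("Expert (31-50 Issues)", 31), ("Master (51+ Issues)", 51)]
def commitThresholds : List (String × Int) :=
  [("Beginner (1-50 Commits)", 1), ("Contributor (51-100 Commits)", 51), ("Analyst (101-250 Commits)", 101),
   ("Expert (251-500 Commits)", 251), ("Master (501+ Commits)", 501)]

-- the 'for … in reversed(items): if count >= threshold: role = …; break' loop
def scanFirst (items : List (String × Int)) (count : Int) : Option String :=
  match items with
  | [] => none
  | (role, threshold) :: rest =>
      if count ≥ threshold then some role else scanFirst rest count

def determine_role (pr_count : Int) (issues_count : Int) (commits_count : Int) : Option String × Option String × Option String :=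
  (scanFirst prThresholds.reverse pr_count,
   scanFirst issueThresholds.reverse issues_count,
   scanFirst commitThresholds.reverse commits_count)

-- ===== PORT B =====
-- bisect.bisect_right on an ascending list = number of elements ≤ x (stdlib call, ported by its contract)
def bisectRight (xs : List Int) (x : Int) : Int := (xs.takeWhile (fun t => decide (t ≤ x))).length

def tierRole (tiers : List (String × Int)) (count : Int) : Option String :=
  let roles := tiers.map Prod.fst
  let thresholds := tiers.map Prod.snd
  let idx := bisectRight thresholds count - 1
  if idx ≥ 0 then roles[idx.toNat]? else none

def determine_role_alt (pr_count : Int) (issues_count : Int) (commits_count : Int) : Option String × Option String × Option String :=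
  (tierRole prThresholds pr_count, tierRole issueThresholds issues_count, tierRole commitThresholds commits_count)

-- ===== PRECONDITION & SPEC =====
def Spec_determine_role (pr_count : Int) (issues_count : Int) (commits_count : Int) (out : Option String × Option String × Option String) : Prop := out = determine_role_alt pr_count issues_count commits_count
instance (pr_count : Int) (issues_count : Int) (commits_count : Int) (out : Option String × Option String × Option String) : Decidable (Spec_determine_role pr_count issues_count commits_count out) := by unfold Spec_determine_role; infer_instance

-- ===== CLAIM (what is proved, stated in full; the proofs are below) =====
def Claim_equal_determine_role : Prop := ∀ (pr_count : Int) (issues_count : Int) (commits_count : Int), Dom_determine_role pr_count issues_count commits_count → Spec_determine_role pr_count issues_count commits_count (determine_role pr_count issues_count commits_count)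

-- ===== LEMMAS AND PROOFS =====
theorem tier_pr (c : Int) : scanFirst prThresholds.reverse c = tierRole prThresholds c := by
  by_cases h0 : (1:Int) ≤ c <;> by_cases h1 : (6:Int) ≤ c <;> by_cases h2 : (16:Int) ≤ c <;> by_cases h3 : (31:Int) ≤ c <;> by_cases h4 : (51:Int) ≤ c <;>
    simp [scanFirst, tierRole, bisectRight, prThresholds, List.takeWhile, h0, h1, h2, h3, h4] <;> omega

theorem tier_issue (c : Int) : scanFirst issueThresholds.reverse c = tierRole issueThresholds c := by
  by_cases h0 : (1:Int) ≤ c <;> by_cases h1 : (6:Int) ≤ c <;> by_cases h2 : (16:Int) ≤ c <;> by_cases h3 : (31:Int) ≤ c <;> by_cases h4 : (51:Int) ≤ c <;>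
    simp [scanFirst, tierRole, bisectRight, issueThresholds, List.takeWhile, h0, h1, h2, h3, h4] <;> omega

theorem tier_commit (c : Int) : scanFirst commitThresholds.reverse c = tierRole commitThresholds c := by
  by_cases h0 : (1:Int) ≤ c <;> by_cases h1 : (51:Int) ≤ c <;> by_cases h2 : (101:Int) ≤ c <;> by_cases h3 : (251:Int) ≤ c <;> by_cases h4 : (501:Int) ≤ c <;>
    simp [scanFirst, tierRole, bisectRight, commitThresholds, List.takeWhile, h0, h1, h2, h3, h4] <;> omega

-- ===== VERDICT (by name: the statement is the Claim_ definition above) =====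
theorem determine_role_spec : Claim_equal_determine_role := by
  intro pr is cm _
  show _ = _
  unfold determine_role determine_role_alt
  rw [tier_pr, tier_issue, tier_commit]
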